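-- pv_equiv track=rewrite | github.com/involutefish/pitch_class_Set_calculator_expansion | pcs_calculator_GUI_1.2.py | forte_normal_form
-- ===== SOURCE A (Python) =====
-- import builtins
--
-- def parse_pcs(pcs):
--
--     note_map = {
--         "C": 0, "C#": 1, "DB": 1, "D": 2, "D#": 3, "EB": 3, "E": 4,
--         "F": 5, "F#": 6, "GB": 6, "G": 7, "G#": 8, "AB": 8,
--         "A": 9, "A#": 10, "BB": 10, "B": 11
--     }
--
--     if isinstance(pcs, (list, builtins.set, tuple)):
--         result = builtins.set()
--         for x in pcs:
--             if isinstance(x, int):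
--                 result.add(x % 12)
--             elif isinstance(x, str) and x.strip().isdigit():
--                 result.add(int(x.strip()) % 12)
--             else:
--                 token = str(x).strip().upper().replace('♯', '#').replace('♭', 'B')
--                 if token in note_map:
--                     result.add(note_map[token])
--         return result
--
--     text = str(pcs)
--     text = text.replace('-', ',')
--     tokens = [t.strip() for t in text.split(',') if t.strip() != '']
--
--     result = builtins.set()
--     for t in tokens:
--         tok = t.upper().replace('♯', '#').replace('♭', 'B')
--         if tok in note_map:
--             result.add(note_map[tok])
--             continue
--         if tok.lstrip('-').isdigit():
--             try:
--                 result.add(int(tok) % 12)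
--                 continue
--             except ValueError:
--                 pass
--     return result
--
-- def generate_rotations(pcs):
--     """生成集合的所有轮转排列"""
--     pcs_set = parse_pcs(pcs)
--     pcs_sorted = sorted(pcs_set)
--     return [pcs_sorted[i:] + pcs_sorted[:i] for i in range(len(pcs_sorted))]
--
-- def compacted_sets(pcs):
--     """计算最紧密集合"""
--     rotations = generate_rotations(pcs)
--     interval_set = [(ps[-1] - ps[0]) % 12 for ps in rotations]
--     min_value = min(interval_set)
--     min_indices = [i for i, val in enumerate(interval_set) if val == min_value]
--     return [rotations[i] for i in min_indices]
--
-- def forte_normal_form(pcs):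
--     """计算福特标准型"""
--     set_list = compacted_sets(pcs)
--     if len(set_list) == 1:
--         return set_list[0]
--
--     def recursive_selection(sets, index):
--         if len(sets) == 1 or index >= len(sets[0]):
--             return min(sets)
--         interval_diffs = [(ps[index] - ps[0]) % 12 for ps in sets]
--         min_val = min(interval_diffs)
--         min_indices = [i for i, val in enumerate(interval_diffs) if val == min_val]
--         return recursive_selection([sets[i] for i in min_indices], index + 1)
--
--     return recursive_selection(set_list, 1)
-- ===== SOURCE B (Python) =====
-- def forte_normal_form(pcs):
--     """Forte normal form: pick the best rotation by a single lexicographic key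
--     (outer interval, then inner intervals, then the rotation itself)."""
--     pcs_sorted = sorted({x % 12 for x in pcs})
--     n = len(pcs_sorted)
--     rotations = [pcs_sorted[i:] + pcs_sorted[:i] for i in range(n)]
--
--     def key(ps):
--         return [(ps[-1] - ps[0]) % 12] + [(ps[i] - ps[0]) % 12 for i in range(1, n)] + ps
--
--     return min(rotations, key=key)
-- ===== Notes on version B (the rewrite author's own statement) =====
-- stated objective: simpler
-- what changed: The compacted_sets pass plus the recursive index-by-index narrowing cascade is replaced by computing one lexicographic comparison key per rotation (outer interval, then the inner intervals, then the rotation itself) and taking a single min over the rotations.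
import Mathlib
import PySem

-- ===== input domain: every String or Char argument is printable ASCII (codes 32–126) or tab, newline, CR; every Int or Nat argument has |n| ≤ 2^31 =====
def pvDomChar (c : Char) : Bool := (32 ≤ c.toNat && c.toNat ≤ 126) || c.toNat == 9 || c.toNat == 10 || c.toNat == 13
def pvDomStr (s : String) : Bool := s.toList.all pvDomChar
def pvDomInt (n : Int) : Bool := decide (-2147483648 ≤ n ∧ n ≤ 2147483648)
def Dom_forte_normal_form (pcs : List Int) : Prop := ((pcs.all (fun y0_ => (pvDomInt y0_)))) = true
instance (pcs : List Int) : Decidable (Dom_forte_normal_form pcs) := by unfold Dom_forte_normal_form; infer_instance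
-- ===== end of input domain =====

-- B replaces A's compacted_sets + recursive_selection cascade by a single min over
-- rotations with one lexicographic list key (objective: simpler; same asymptotic cost).


-- ===== PORT A =====
-- parse_pcs, restricted to the List-of-int branch (the input type here is List Int):
-- result = set(); for x: result.add(x % 12)
def parse_pcs (pcs : List Int) : PySem.Set Int :=
  pcs.foldl (fun result x => PySem.Set.add result (PySem.Int.mod x 12)) PySem.Set.empty

def generate_rotations (pcs : List Int) : List (List Int) :=
  let pcs_sorted := PySem.List.sorted (parse_pcs pcs) (fun x => x) false
  (PySem.List.pyRange 0 (pcs_sorted.length : Int) 1).map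
    (fun i => PySem.List.slice pcs_sorted (some i) none ++ PySem.List.slice pcs_sorted none (some i))

def compacted_sets (pcs : List Int) : List (List Int) :=
  let rotations := generate_rotations pcs
  let interval_set := rotations.map (fun ps =>
    PySem.Int.mod (PySem.List.pyGetD ps (-1) 0 - PySem.List.pyGetD ps 0 0) 12)
  match PySem.List.min? interval_set (fun v => v) with
  | none => []  -- min([]) raises ValueError: the empty input is excluded by Pre_
  | some min_value =>
    let min_indices := ((PySem.List.enumerate interval_set 0).filter (fun p => p.2 == min_value)).map (·.1)
    min_indices.map (fun i => PySem.List.pyGetD rotations i [])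

-- the nested recursive_selection of A; the Nat fuel only makes the recursion structural
-- (it is never exhausted on the call forte_normal_form makes: index grows up to len(sets[0]))
def recursive_selection (fuel : Nat) (sets : List (List Int)) (index : Int) : List Int :=
  if sets.length == 1 || decide (((sets.headD []).length : Int) ≤ index) then
    (PySem.List.min? sets (fun x => x)).getD []   -- min(sets); sets is never [] here
  else
    match fuel with
    | 0 => []
    | fuel+1 =>
      let interval_diffs := sets.map (fun ps =>
        PySem.Int.mod (PySem.List.pyGetD ps index 0 - PySem.List.pyGetD ps 0 0) 12)
      match PySem.List.min? interval_diffs (fun v => v) with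
      | none => []   -- unreachable: sets ≠ []
      | some min_val =>
        let min_indices := ((PySem.List.enumerate interval_diffs 0).filter (fun p => p.2 == min_val)).map (·.1)
        recursive_selection fuel (min_indices.map (fun i => PySem.List.pyGetD sets i [])) (index + 1)

def forte_normal_form (pcs : List Int) : List Int :=
  let set_list := compacted_sets pcs
  if set_list.length == 1 then PySem.List.pyGetD set_list 0 []
  else recursive_selection ((set_list.headD []).length) set_list 1

-- ===== PORT B =====
def forte_normal_form_alt (pcs : List Int) : List Int :=
  let pcs_sorted := PySem.List.sorted
    (PySem.Set.ofList (pcs.map (fun x => PySem.Int.mod x 12))) (fun x => x) false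
  let n : Int := pcs_sorted.length
  let rotations := (PySem.List.pyRange 0 n 1).map
    (fun i => PySem.List.slice pcs_sorted (some i) none ++ PySem.List.slice pcs_sorted none (some i))
  let key : List Int → List Int := fun ps =>
    PySem.Int.mod (PySem.List.pyGetD ps (-1) 0 - PySem.List.pyGetD ps 0 0) 12
      :: ((PySem.List.pyRange 1 n 1).map (fun i =>
            PySem.Int.mod (PySem.List.pyGetD ps i 0 - PySem.List.pyGetD ps 0 0) 12) ++ ps)
  (PySem.List.min? rotations key).getD []   -- min([]) raises ValueError: excluded by Pre_

-- ===== PRECONDITION & SPEC =====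
-- Pre_ excludes only the empty list, on which A raises ValueError (min() of an empty sequence).
def Pre_forte_normal_form (pcs : List Int) : Prop := pcs ≠ []
instance (pcs : List Int) : Decidable (Pre_forte_normal_form pcs) := by
  unfold Pre_forte_normal_form; infer_instance
def pvWitness_forte_normal_form : List Int := [0, 4, 7]

def Spec_forte_normal_form (pcs : List Int) (out : List Int) : Prop := out = forte_normal_form_alt pcs
instance (pcs : List Int) (out : List Int) : Decidable (Spec_forte_normal_form pcs out) := by unfold Spec_forte_normal_form; infer_instance

-- ===== CLAIM (what is proved, stated in full; the proofs are below) =====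
def Claim_equal_forte_normal_form : Prop := ∀ (pcs : List Int), Dom_forte_normal_form pcs → Pre_forte_normal_form pcs → Spec_forte_normal_form pcs (forte_normal_form pcs)

-- ===== LEMMAS AND PROOFS =====

-- parse_pcs is set(x % 12 for x in pcs)
theorem parse_pcs_eq (pcs : List Int) :
    parse_pcs pcs = PySem.Set.ofList (pcs.map (fun x => PySem.Int.mod x 12)) := by
  simp [parse_pcs, PySem.Set.ofList_eq_foldl, List.foldl_map, PySem.Set.empty]

-- A's enumerate / filter-on-value / index-back pipeline IS List.filter
theorem sel_eq {α : Type} (L : List α) (d : α) (f : α → Int) (m : Int) :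
    ∀ (xs : List α) (s : Nat),
      (∀ (j : Nat), j < xs.length → PySem.List.pyGetD L ((s + j : Nat) : Int) d = (xs[j]?).getD d) →
      (((PySem.List.enumerate (xs.map f) ((s : Nat) : Int)).filter
          (fun p => p.2 == m)).map (·.1)).map (fun i => PySem.List.pyGetD L i d)
        = xs.filter (fun x => f x == m) := by
  intro xs
  induction xs with
  | nil => intro s h; simp [PySem.List.enumerate_nil]
  | cons x xs ih =>
    intro s h
    have hx : PySem.List.pyGetD L ((s : Nat) : Int) d = x := by
      have := h 0 (by simp); simpa using this
    have htail : ∀ (j : Nat), j < xs.length →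
        PySem.List.pyGetD L ((s + 1 + j : Nat) : Int) d = (xs[j]?).getD d := by
      intro j hj
      have := h (j+1) (by simpa using Nat.succ_lt_succ hj)
      rw [show s + 1 + j = s + (j + 1) by omega]
      simpa using this
    have hcast : ((s : Nat) : Int) + 1 = ((s + 1 : Nat) : Int) := by push_cast; ring
    simp only [List.map_cons, PySem.List.enumerate_cons, List.filter_cons]
    by_cases hfx : (f x == m) = true
    · simp only [hfx, if_true, List.map_cons, hx]
      rw [hcast, ih (s+1) htail]
    · simp only [hfx, Bool.false_eq_true, if_false]
      rw [hcast, ih (s+1) htail]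

theorem min?_singleton {α κ : Type} [LT κ] [DecidableLT κ] (x : α) (key : α → κ) :
    PySem.List.min? [x] key = some x := rfl

-- min? is a foldl with this step
def minStep {α : Type} (key : α → List Int) (acc : Option α) (x : α) : Option α :=
  match acc with
  | none => some x
  | some m => if key x < key m then some x else some m

theorem min?_eq_foldl {α : Type} (xs : List α) (key : α → List Int) :
    PySem.List.min? xs key = xs.foldl (minStep key) none := rfl

-- invariant tying the fold over L to the fold over L.filter P
def MinInv {α : Type} (P : α → Bool) (L : List α) (acc acc' : Option α) : Prop :=
  (acc = none ∧ acc' = none) ∨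
  (∃ a, acc = some a ∧ a ∈ L ∧ ((P a = true ∧ acc' = some a) ∨ (P a = false ∧ acc' = none)))

theorem min?_filter_aux {α : Type} (key key' : α → List Int) (P : α → Bool) (L : List α)
    (hb : ∀ x ∈ L, ∀ y ∈ L, P x = true → P y = false → key x < key y)
    (hc : ∀ x ∈ L, ∀ y ∈ L, P x = true → P y = true → (key x < key y ↔ key' x < key' y)) :
    ∀ (xs : List α), (∀ x ∈ xs, x ∈ L) → ∀ (acc acc' : Option α), MinInv P L acc acc' →
      MinInv P L (xs.foldl (minStep key) acc) ((xs.filter P).foldl (minStep key') acc') := by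
  intro xs
  induction xs with
  | nil => intro _ acc acc' h; simpa using h
  | cons x xs ih =>
    intro hsub acc acc' hinv
    have hxL : x ∈ L := hsub x (by simp)
    have hsub' : ∀ z ∈ xs, z ∈ L := fun z hz => hsub z (by simp [hz])
    rw [List.filter_cons, List.foldl_cons]
    rcases hinv with ⟨rfl, rfl⟩ | ⟨a, rfl, haL, ⟨hPa, rfl⟩ | ⟨hPa, rfl⟩⟩
    · cases hPx : P x with
      | true =>
        simp only [if_true, List.foldl_cons]
        exact ih hsub' (some x) (some x) (Or.inr ⟨x, rfl, hxL, Or.inl ⟨hPx, rfl⟩⟩)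
      | false =>
        simp only [Bool.false_eq_true, if_false]
        exact ih hsub' (some x) none (Or.inr ⟨x, rfl, hxL, Or.inr ⟨hPx, rfl⟩⟩)
    · cases hPx : P x with
      | true =>
        simp only [if_true, List.foldl_cons]
        have hiff := hc x hxL a haL hPx hPa
        by_cases hlt : key x < key a
        · simp only [minStep, if_pos hlt, if_pos (hiff.mp hlt)]
          exact ih hsub' (some x) (some x) (Or.inr ⟨x, rfl, hxL, Or.inl ⟨hPx, rfl⟩⟩)
        · simp only [minStep, if_neg hlt, if_neg (fun h => hlt (hiff.mpr h))]
          exact ih hsub' (some a) (some a) (Or.inr ⟨a, rfl, haL, Or.inl ⟨hPa, rfl⟩⟩)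
      | false =>
        simp only [Bool.false_eq_true, if_false]
        have hlt := hb a haL x hxL hPa hPx
        have hnlt : ¬ key x < key a := List.lt_asymm hlt
        simp only [minStep, if_neg hnlt]
        exact ih hsub' (some a) (some a) (Or.inr ⟨a, rfl, haL, Or.inl ⟨hPa, rfl⟩⟩)
    · cases hPx : P x with
      | true =>
        simp only [if_true, List.foldl_cons]
        have hlt := hb x hxL a haL hPx hPa
        simp only [minStep, if_pos hlt]
        exact ih hsub' (some x) (some x) (Or.inr ⟨x, rfl, hxL, Or.inl ⟨hPx, rfl⟩⟩)
      | false =>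
        simp only [Bool.false_eq_true, if_false]
        by_cases hlt : key x < key a
        · simp only [minStep, if_pos hlt]
          exact ih hsub' (some x) none (Or.inr ⟨x, rfl, hxL, Or.inr ⟨hPx, rfl⟩⟩)
        · simp only [minStep, if_neg hlt]
          exact ih hsub' (some a) none (Or.inr ⟨a, rfl, haL, Or.inr ⟨hPa, rfl⟩⟩)

-- min over a key that leads with the filtering criterion = min of the filtered list over the rest
theorem min?_filter {α : Type} (key key' : α → List Int) (P : α → Bool) (L : List α)
    (hex : ∃ x ∈ L, P x = true)
    (hb : ∀ x ∈ L, ∀ y ∈ L, P x = true → P y = false → key x < key y)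
    (hc : ∀ x ∈ L, ∀ y ∈ L, P x = true → P y = true → (key x < key y ↔ key' x < key' y)) :
    PySem.List.min? L key = PySem.List.min? (L.filter P) key' := by
  have h := min?_filter_aux key key' P L hb hc L (fun _ h => h) none none (Or.inl ⟨rfl, rfl⟩)
  rw [min?_eq_foldl, min?_eq_foldl]
  rcases h with ⟨hA, hB⟩ | ⟨a, hA, haL, ⟨hPa, hB⟩ | ⟨hPa, hB⟩⟩
  · rw [hA, hB]
  · rw [hA, hB]
  · exfalso
    have hnone : PySem.List.min? (L.filter P) key' = none := by rw [min?_eq_foldl]; exact hB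
    rw [PySem.List.min?_eq_none_iff] at hnone
    obtain ⟨x, hxL, hPx⟩ := hex
    have hmm : x ∈ L.filter P := List.mem_filter.mpr ⟨hxL, hPx⟩
    rw [hnone] at hmm
    exact absurd hmm (List.not_mem_nil)

-- the recursive narrowing = one min over the lexicographic key of the remaining intervals
theorem recursive_selection_eq (n : Nat) :
    ∀ (fuel : Nat) (sets : List (List Int)) (index : Int),
      sets ≠ [] → (∀ ps ∈ sets, ps.length = n) → 0 ≤ index → (n : Int) ≤ index + fuel →
      recursive_selection fuel sets index
        = (PySem.List.min? sets (fun ps =>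
            (PySem.List.pyRange index (n : Int) 1).map (fun i =>
              PySem.Int.mod (PySem.List.pyGetD ps i 0 - PySem.List.pyGetD ps 0 0) 12) ++ ps)).getD [] := by
  intro fuel
  induction fuel with
  | zero =>
    intro sets index hne hlen _ hfu
    have hni : (n : Int) ≤ index := by simpa using hfu
    obtain ⟨ps0, t, rfl⟩ := List.exists_cons_of_ne_nil hne
    have hh : (((ps0 :: t).headD []).length : Int) = (n : Int) := by
      simpa using congrArg (Int.ofNat) (hlen ps0 (by simp))
    rw [recursive_selection]
    rw [if_pos (by
      simp only [Bool.or_eq_true, beq_iff_eq, decide_eq_true_eq]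
      exact Or.inr (by rw [hh]; exact hni))]
    simp only [PySem.List.pyRange_one_eq_nil hni, List.map_nil, List.nil_append]
  | succ fuel ih =>
    intro sets index hne hlen h0 hfu
    by_cases h1 : sets.length = 1
    · obtain ⟨ps, rfl⟩ := List.length_eq_one_iff.mp h1
      rw [recursive_selection]
      rw [if_pos (by simp)]
      simp [min?_singleton]
    · by_cases h2 : (n : Int) ≤ index
      · obtain ⟨ps0, t, rfl⟩ := List.exists_cons_of_ne_nil hne
        have hh : (((ps0 :: t).headD []).length : Int) = (n : Int) := by
          simpa using congrArg (Int.ofNat) (hlen ps0 (by simp))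
        rw [recursive_selection]
        rw [if_pos (by
          simp only [Bool.or_eq_true, beq_iff_eq, decide_eq_true_eq]
          exact Or.inr (by rw [hh]; exact h2))]
        simp only [PySem.List.pyRange_one_eq_nil h2, List.map_nil, List.nil_append]
      · have h2' : index < (n : Int) := by omega
        obtain ⟨ps0, t, hsets⟩ := List.exists_cons_of_ne_nil hne
        have hh : ((sets.headD []).length : Int) = (n : Int) := by
          subst hsets; simpa using congrArg (Int.ofNat) (hlen ps0 (by simp))
        rw [recursive_selection]
        rw [if_neg (by
          simp only [Bool.or_eq_true, beq_iff_eq, decide_eq_true_eq, not_or]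
          exact ⟨h1, by rw [hh]; omega⟩)]
        obtain ⟨m, hm⟩ : ∃ m, PySem.List.min? (sets.map (fun ps =>
            PySem.Int.mod (PySem.List.pyGetD ps index 0 - PySem.List.pyGetD ps 0 0) 12)) (fun v => v) = some m := by
          cases hmm : PySem.List.min? (sets.map (fun ps =>
              PySem.Int.mod (PySem.List.pyGetD ps index 0 - PySem.List.pyGetD ps 0 0) 12)) (fun v => v) with
          | none =>
            rw [PySem.List.min?_eq_none_iff] at hmm
            exact absurd (List.map_eq_nil_iff.mp hmm) hne
          | some m => exact ⟨m, rfl⟩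
        simp only [hm]
        have hidx : ∀ (j : Nat), j < sets.length →
            PySem.List.pyGetD sets ((0 + j : Nat) : Int) [] = (sets[j]?).getD [] := by
          intro j hj
          simp [PySem.List.pyGetD_natCast, List.getD_eq_getElem?_getD]
        have hsel := sel_eq sets [] (fun ps =>
          PySem.Int.mod (PySem.List.pyGetD ps index 0 - PySem.List.pyGetD ps 0 0) 12) m sets 0 hidx
        simp only [Nat.cast_zero] at hsel
        rw [hsel]
        have hmem : ∃ x ∈ sets, ((fun ps =>
            PySem.Int.mod (PySem.List.pyGetD ps index 0 - PySem.List.pyGetD ps 0 0) 12) x == m) = true := by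
          obtain ⟨x, hx, hfx⟩ := List.mem_map.mp (PySem.List.min?_mem hm)
          exact ⟨x, hx, beq_iff_eq.mpr hfx⟩
        have hnextne : sets.filter (fun x =>
            PySem.Int.mod (PySem.List.pyGetD x index 0 - PySem.List.pyGetD x 0 0) 12 == m) ≠ [] := by
          obtain ⟨x, hx, hfx⟩ := hmem
          exact List.ne_nil_of_mem (List.mem_filter.mpr ⟨hx, hfx⟩)
        have hnextlen : ∀ ps ∈ sets.filter (fun x =>
            PySem.Int.mod (PySem.List.pyGetD x index 0 - PySem.List.pyGetD x 0 0) 12 == m), ps.length = n :=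
          fun ps hps => hlen ps (List.mem_filter.mp hps).1
        rw [ih (sets.filter (fun x =>
            PySem.Int.mod (PySem.List.pyGetD x index 0 - PySem.List.pyGetD x 0 0) 12 == m)) (index+1)
          hnextne hnextlen (by omega) (by push_cast at hfu ⊢; omega)]
        rw [show PySem.List.pyRange index (n : Int) 1 = index :: PySem.List.pyRange (index+1) (n : Int) 1
          from PySem.List.pyRange_one_cons h2']
        simp only [List.map_cons, List.cons_append]
        congr 1
        refine (min?_filter _ _ (fun x =>
          PySem.Int.mod (PySem.List.pyGetD x index 0 - PySem.List.pyGetD x 0 0) 12 == m) sets hmem ?_ ?_).symm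
        · intro x hx y hy hPx hPy
          have hx' : PySem.Int.mod (PySem.List.pyGetD x index 0 - PySem.List.pyGetD x 0 0) 12 = m := beq_iff_eq.mp hPx
          have hy' : PySem.Int.mod (PySem.List.pyGetD y index 0 - PySem.List.pyGetD y 0 0) 12 ≠ m := ne_of_beq_false hPy
          have hle : m ≤ PySem.Int.mod (PySem.List.pyGetD y index 0 - PySem.List.pyGetD y 0 0) 12 :=
            PySem.List.min?_isMin hm _ (List.mem_map_of_mem hy)
          refine List.cons_lt_cons_iff.mpr (Or.inl ?_)
          rw [hx']
          exact lt_of_le_of_ne hle (Ne.symm hy')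
        · intro x hx y hy hPx hPy
          have hx' : PySem.Int.mod (PySem.List.pyGetD x index 0 - PySem.List.pyGetD x 0 0) 12 = m := beq_iff_eq.mp hPx
          have hy' : PySem.Int.mod (PySem.List.pyGetD y index 0 - PySem.List.pyGetD y 0 0) 12 = m := beq_iff_eq.mp hPy
          rw [List.cons_lt_cons_iff, hx', hy']
          simp

-- ===== VERDICT (by name: the statement is the Claim_ definition above) =====
theorem forte_normal_form_spec : Claim_equal_forte_normal_form := by
  intro pcs _ hpre
  unfold Spec_forte_normal_form
  obtain ⟨p0, rest, rfl⟩ := List.exists_cons_of_ne_nil hpre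
  simp only [forte_normal_form, forte_normal_form_alt, compacted_sets, generate_rotations, parse_pcs_eq]
  set s := PySem.List.sorted
    (PySem.Set.ofList (List.map (fun x => PySem.Int.mod x 12) (p0 :: rest))) (fun x => x) false with hs
  have hsne : s ≠ [] := by
    have hmem : PySem.Int.mod p0 12 ∈ s := by
      rw [hs, PySem.List.mem_sorted, PySem.Set.mem_ofList]
      exact List.mem_map_of_mem (by simp)
    exact List.ne_nil_of_mem hmem
  set n := s.length with hn
  have hn0 : 0 < n := by
    rw [hn]
    exact Nat.pos_of_ne_zero (fun h => hsne (List.eq_nil_of_length_eq_zero h))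
  set rotations := List.map
    (fun i => PySem.List.slice s (some i) none ++ PySem.List.slice s none (some i))
    (PySem.List.pyRange 0 (n : Int) 1) with hrotations
  have hrotlen : rotations.length = n := by
    rw [hrotations]; simp [PySem.List.length_pyRange_one]
  have hrotne : rotations ≠ [] := by
    intro h; rw [h] at hrotlen; simp at hrotlen; omega
  have hrlen : ∀ ps ∈ rotations, ps.length = n := by
    intro ps hps
    rw [hrotations] at hps
    obtain ⟨i, hi, rfl⟩ := List.mem_map.mp hps
    obtain ⟨hi0, hiN⟩ := PySem.List.mem_pyRange_one.mp hi
    rw [PySem.List.slice_from s hi0, PySem.List.slice_to s hi0]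
    simp only [List.length_append, List.length_drop, List.length_take]
    omega
  obtain ⟨m0, hm0⟩ : ∃ m, PySem.List.min? (rotations.map (fun ps =>
      PySem.Int.mod (PySem.List.pyGetD ps (-1) 0 - PySem.List.pyGetD ps 0 0) 12)) (fun v => v) = some m := by
    cases hmm : PySem.List.min? (rotations.map (fun ps =>
        PySem.Int.mod (PySem.List.pyGetD ps (-1) 0 - PySem.List.pyGetD ps 0 0) 12)) (fun v => v) with
    | none =>
      rw [PySem.List.min?_eq_none_iff] at hmm
      exact absurd (List.map_eq_nil_iff.mp hmm) hrotne
    | some m => exact ⟨m, rfl⟩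
  simp only [hm0]
  have hidx : ∀ (j : Nat), j < rotations.length →
      PySem.List.pyGetD rotations ((0 + j : Nat) : Int) [] = (rotations[j]?).getD [] := by
    intro j hj
    simp [PySem.List.pyGetD_natCast, List.getD_eq_getElem?_getD]
  have hsel := sel_eq rotations [] (fun ps =>
    PySem.Int.mod (PySem.List.pyGetD ps (-1) 0 - PySem.List.pyGetD ps 0 0) 12) m0 rotations 0 hidx
  simp only [Nat.cast_zero] at hsel
  rw [hsel]
  have hmem0 : ∃ x ∈ rotations, ((fun ps =>
      PySem.Int.mod (PySem.List.pyGetD ps (-1) 0 - PySem.List.pyGetD ps 0 0) 12) x == m0) = true := by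
    obtain ⟨x, hx, hfx⟩ := List.mem_map.mp (PySem.List.min?_mem hm0)
    exact ⟨x, hx, beq_iff_eq.mpr hfx⟩
  have hSLne : rotations.filter (fun x =>
      PySem.Int.mod (PySem.List.pyGetD x (-1) 0 - PySem.List.pyGetD x 0 0) 12 == m0) ≠ [] := by
    obtain ⟨x, hx, hfx⟩ := hmem0
    exact List.ne_nil_of_mem (List.mem_filter.mpr ⟨hx, hfx⟩)
  have hSLlen : ∀ ps ∈ rotations.filter (fun x =>
      PySem.Int.mod (PySem.List.pyGetD x (-1) 0 - PySem.List.pyGetD x 0 0) 12 == m0), ps.length = n :=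
    fun ps hps => hrlen ps (List.mem_filter.mp hps).1
  have hBmin : PySem.List.min? rotations (fun ps =>
        PySem.Int.mod (PySem.List.pyGetD ps (-1) 0 - PySem.List.pyGetD ps 0 0) 12
          :: ((PySem.List.pyRange 1 (n : Int) 1).map (fun i =>
                PySem.Int.mod (PySem.List.pyGetD ps i 0 - PySem.List.pyGetD ps 0 0) 12) ++ ps))
      = PySem.List.min? (rotations.filter (fun x =>
          PySem.Int.mod (PySem.List.pyGetD x (-1) 0 - PySem.List.pyGetD x 0 0) 12 == m0))
        (fun ps => (PySem.List.pyRange 1 (n : Int) 1).map (fun i =>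
          PySem.Int.mod (PySem.List.pyGetD ps i 0 - PySem.List.pyGetD ps 0 0) 12) ++ ps) := by
    refine min?_filter _ _ (fun x =>
      PySem.Int.mod (PySem.List.pyGetD x (-1) 0 - PySem.List.pyGetD x 0 0) 12 == m0) rotations hmem0 ?_ ?_
    · intro x hx y hy hPx hPy
      have hx' : PySem.Int.mod (PySem.List.pyGetD x (-1) 0 - PySem.List.pyGetD x 0 0) 12 = m0 := beq_iff_eq.mp hPx
      have hy' : PySem.Int.mod (PySem.List.pyGetD y (-1) 0 - PySem.List.pyGetD y 0 0) 12 ≠ m0 := ne_of_beq_false hPy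
      have hle : m0 ≤ PySem.Int.mod (PySem.List.pyGetD y (-1) 0 - PySem.List.pyGetD y 0 0) 12 :=
        PySem.List.min?_isMin hm0 _ (List.mem_map_of_mem hy)
      refine List.cons_lt_cons_iff.mpr (Or.inl ?_)
      rw [hx']
      exact lt_of_le_of_ne hle (Ne.symm hy')
    · intro x hx y hy hPx hPy
      have hx' : PySem.Int.mod (PySem.List.pyGetD x (-1) 0 - PySem.List.pyGetD x 0 0) 12 = m0 := beq_iff_eq.mp hPx
      have hy' : PySem.Int.mod (PySem.List.pyGetD y (-1) 0 - PySem.List.pyGetD y 0 0) 12 = m0 := beq_iff_eq.mp hPy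
      rw [List.cons_lt_cons_iff, hx', hy']
      simp
  rw [hBmin]
  by_cases hl1 : (rotations.filter (fun x =>
      PySem.Int.mod (PySem.List.pyGetD x (-1) 0 - PySem.List.pyGetD x 0 0) 12 == m0)).length = 1
  · obtain ⟨x, hx⟩ := List.length_eq_one_iff.mp hl1
    rw [if_pos (beq_iff_eq.mpr hl1)]
    rw [hx, min?_singleton]
    rfl
  · rw [if_neg (by simp only [beq_iff_eq]; exact hl1)]
    have hfuel : (((rotations.filter (fun x =>
        PySem.Int.mod (PySem.List.pyGetD x (-1) 0 - PySem.List.pyGetD x 0 0) 12 == m0)).headD []).length) = n := by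
      obtain ⟨x0, t0, hx0⟩ := List.exists_cons_of_ne_nil hSLne
      rw [hx0, List.headD_cons]
      exact hSLlen x0 (by rw [hx0]; simp)
    rw [recursive_selection_eq n _ _ 1 hSLne hSLlen (by omega) (by rw [hfuel]; omega)]
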